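-- pv_equiv track=rewrite | github.com/p-jiho/Stock-prediction | Practice_Python/NLP_Preprocessing_10years.py | type_conversion
-- ===== SOURCE A (Python) =====
-- def type_conversion(df):  ## 한 코어가 실행한 n개의 데이터 프레임을 1개로 합치는 함수
--
--     original_data = []
--     tit_txt_combination = []
--
--     for j in df:
--         original_data_, tit_txt_combination_ = j
--         original_data = original_data + original_data_
--         tit_txt_combination = tit_txt_combination + tit_txt_combination_
--     return [original_data, tit_txt_combination]
-- ===== SOURCE B (Python) =====
-- import itertools
--
-- def type_conversion(df):
--     if not df:
--         return [[], []]
--     datas, combos = zip(*df)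
--     return [list(itertools.chain.from_iterable(datas)),
--             list(itertools.chain.from_iterable(combos))]
-- ===== Notes on version B (the rewrite author's own statement) =====
-- stated objective: faster
-- what changed: Replaces the interleaved accumulating loop whose repeated list+list concatenation is quadratic in the total number of elements by a transpose (zip(*df)) into two column groups followed by two linear flatten passes with itertools.chain.from_iterable.
import Mathlib
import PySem

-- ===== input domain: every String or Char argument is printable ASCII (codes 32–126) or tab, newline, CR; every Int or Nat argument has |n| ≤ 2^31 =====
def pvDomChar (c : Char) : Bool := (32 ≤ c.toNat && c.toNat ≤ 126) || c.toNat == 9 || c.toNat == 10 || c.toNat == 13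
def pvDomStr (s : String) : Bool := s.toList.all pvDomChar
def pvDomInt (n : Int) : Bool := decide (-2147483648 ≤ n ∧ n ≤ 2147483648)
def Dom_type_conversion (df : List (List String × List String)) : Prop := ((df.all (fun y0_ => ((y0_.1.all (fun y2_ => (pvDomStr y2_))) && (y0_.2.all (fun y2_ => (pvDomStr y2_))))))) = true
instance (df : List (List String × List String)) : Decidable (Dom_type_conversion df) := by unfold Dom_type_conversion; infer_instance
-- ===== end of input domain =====

-- B transposes the pairs and flattens each column in one linear pass instead of A's loop with repeated quadratic list concatenation (objective: faster; measured).
-- ===== PORT A =====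
def type_conversion (df : List (List String × List String)) : List (List String) :=
  let s := df.foldl
    (fun (acc : List String × List String) (j : List String × List String) =>
      (acc.1 ++ j.1, acc.2 ++ j.2))
    ([], [])
  [s.1, s.2]

-- ===== PORT B =====
def type_conversion_alt (df : List (List String × List String)) : List (List String) :=
  [(df.map Prod.fst).flatten, (df.map Prod.snd).flatten]

-- ===== PRECONDITION & SPEC =====
def Spec_type_conversion (df : List (List String × List String)) (out : List (List String)) : Prop := out = type_conversion_alt df
instance (df : List (List String × List String)) (out : List (List String)) : Decidable (Spec_type_conversion df out) := by unfold Spec_type_conversion; infer_instance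

-- ===== CLAIM (what is proved, stated in full; the proofs are below) =====
def Claim_equal_type_conversion : Prop := ∀ (df : List (List String × List String)), Dom_type_conversion df → Spec_type_conversion df (type_conversion df)

-- ===== LEMMAS AND PROOFS =====

-- ===== VERDICT (by name: the statement is the Claim_ definition above) =====
-- The foldl accumulates exactly the flattened columns, for any starting accumulator.
theorem tc_foldl_eq (df : List (List String × List String)) (a b : List String) :
    df.foldl
      (fun (acc : List String × List String) (j : List String × List String) =>
        (acc.1 ++ j.1, acc.2 ++ j.2)) (a, b)
      = (a ++ (df.map Prod.fst).flatten, b ++ (df.map Prod.snd).flatten) := by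
  induction df generalizing a b with
  | nil => simp
  | cons h t ih => simp [List.foldl, ih]

theorem type_conversion_spec : Claim_equal_type_conversion := by
  intro df _
  unfold Spec_type_conversion type_conversion type_conversion_alt
  simp [tc_foldl_eq]
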